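-- pv_equiv track=rewrite | github.com/Shriya225/DSA_Solutions | SlidingWindow/GoodSubStr.py | goodSubStr
-- ===== SOURCE A (Python) =====
-- def goodSubStr(a):
--     d=dict()
--     ans=0
--     l=0
--     for r in range(len(a)):
--         if a[r] in d:
--             d[a[r]]+=1
--         else:
--             d[a[r]]=1
--         while d[a[r]]>1 or (r-l+1)>3:
--             d[a[l]]-=1
--             if d[a[l]]==0:
--                 d.pop(a[l])
--             l+=1
--         if (r-l+1)==3:
--             ans+=1
--     return ans
-- ===== SOURCE B (Python) =====
-- def goodSubStr(a):
--     count = 0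
--     for i in range(len(a) - 2):
--         if len(set(a[i:i+3])) == 3:
--             count += 1
--     return count
-- ===== Notes on version B (the rewrite author's own statement) =====
-- stated objective: simpler
-- what changed: Replaced the two-pointer sliding window with a dict of counts by a direct scan over every fixed length-3 window, testing distinctness with len(set(...)) == 3.
import Mathlib
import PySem

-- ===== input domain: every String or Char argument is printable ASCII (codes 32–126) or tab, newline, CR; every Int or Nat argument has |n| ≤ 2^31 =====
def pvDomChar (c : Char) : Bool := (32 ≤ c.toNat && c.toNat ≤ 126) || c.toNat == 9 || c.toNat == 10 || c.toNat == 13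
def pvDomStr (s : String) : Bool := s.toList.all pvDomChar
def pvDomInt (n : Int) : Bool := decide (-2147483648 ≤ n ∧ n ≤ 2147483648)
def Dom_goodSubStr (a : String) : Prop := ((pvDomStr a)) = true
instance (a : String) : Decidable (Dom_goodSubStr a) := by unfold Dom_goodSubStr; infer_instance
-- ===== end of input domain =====

-- B replaces A's two-pointer sliding window (dict of counts, shrink loop) by a direct scan of every
-- fixed length-3 window, testing distinctness with len(set(...)) == 3; same O(n) cost, simpler.

-- ===== PORT A =====
-- the inner 'while d[a[r]]>1 or (r-l+1)>3' loop; fuel only makes the recursion structural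
def shrinkA (la : List Char) (r : Int) (cr : Char) :
    Nat → PySem.Dict Char Int → Int → PySem.Dict Char Int × Int
  | 0, d, l => (d, l)
  | fuel + 1, d, l =>
    if d.getD cr 0 > 1 ∨ r - l + 1 > 3 then
      match PySem.List.pyGet? la l with
      | none => (d, l)      -- IndexError: unreachable, l stays in range
      | some cl =>
        let d1 := d.modify cl 0 (· - 1)
        let d2 := if d1.getD cl 0 = 0 then d1.erase cl else d1
        shrinkA la r cr fuel d2 (l + 1)
    else (d, l)

-- one iteration of A's 'for r in range(len(a))' loop, state (d, ans, l)
def stepA (la : List Char) (st : PySem.Dict Char Int × Int × Int) (r : Int) :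
    PySem.Dict Char Int × Int × Int :=
  let d := st.1
  let ans := st.2.1
  let l := st.2.2
  match PySem.List.pyGet? la r with
  | none => (d, ans, l)   -- IndexError: unreachable, r ∈ range(len(a))
  | some cr =>
    let d1 := if d.contains cr then d.modify cr 0 (· + 1) else d.insert cr 1
    let p := shrinkA la r cr (la.length + 1) d1 l
    let ans1 := if r - p.2 + 1 = 3 then ans + 1 else ans
    (p.1, ans1, p.2)

def goodSubStr (a : String) : Int :=
  let la := a.toList
  ((PySem.List.pyRange 0 (PySem.List.len la) 1).foldl (stepA la)
    (PySem.Dict.empty, 0, 0)).2.1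

-- ===== PORT B =====
def bcount (xs : List Char) : Int :=
  (PySem.List.pyRange 0 (PySem.List.len xs - 2) 1).foldl
    (fun count i =>
      if PySem.List.len (PySem.Set.ofList (PySem.List.slice xs (some i) (some (i + 3)))) = 3
      then count + 1 else count) 0

def goodSubStr_alt (a : String) : Int := bcount a.toList

-- ===== PRECONDITION & SPEC =====
def Spec_goodSubStr (a : String) (out : Int) : Prop := out = goodSubStr_alt a
instance (a : String) (out : Int) : Decidable (Spec_goodSubStr a out) := by unfold Spec_goodSubStr; infer_instance

-- ===== CLAIM (what is proved, stated in full; the proofs are below) =====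
def Claim_equal_goodSubStr : Prop := ∀ (a : String), Dom_goodSubStr a → Spec_goodSubStr a (goodSubStr a)

-- ===== LEMMAS AND PROOFS =====

-- model window: drop from the front while the new char's count exceeds 1 or the window is longer than 3
def win (c : Char) : List Char → List Char
  | [] => []
  | x :: t => if (x :: t).count c > 1 ∨ (x :: t).length > 3 then win c t else x :: t

def stepM (c : Char) (p : List Char × Int) : List Char × Int :=
  let w := win c (p.1 ++ [c])
  (w, p.2 + if w.length = 3 then 1 else 0)

def model (la : List Char) : List Char × Int := la.foldl (fun p c => stepM c p) ([], 0)

-- dict d is exactly the multiset of window w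
def DInv (d : PySem.Dict Char Int) (w : List Char) : Prop :=
  ∀ x : Char, d.get? x = if w.count x = 0 then (none : Option Int) else some ((w.count x : Nat) : Int)

theorem win_suffix (c : Char) (v : List Char) : ∃ j ≤ v.length, win c v = v.drop j := by
  induction v with
  | nil => exact ⟨0, by simp [win]⟩
  | cons x t ih =>
    by_cases h : (x :: t).count c > 1 ∨ (x :: t).length > 3
    · obtain ⟨j, hj, hw⟩ := ih
      exact ⟨j + 1, by simpa using Nat.succ_le_succ hj, by rw [win, if_pos h]; simpa using hw⟩
    · exact ⟨0, by simp, by rw [win, if_neg h]; simp⟩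

theorem DInv_getD {d : PySem.Dict Char Int} {w : List Char} (h : DInv d w) (c : Char) :
    d.getD c 0 = ((w.count c : Nat) : Int) := by
  rw [PySem.Dict.getD_eq_get?_getD, h c]
  by_cases h0 : w.count c = 0 <;> simp [h0]

theorem find?_filter_key (k k' : Char) (l : List (Char × Int)) :
    (l.filter (fun p => !(p.1 == k))).find? (fun p => p.1 == k') =
      if k' = k then none else l.find? (fun p => p.1 == k') := by
  induction l with
  | nil => split <;> rfl
  | cons p rest ih =>
    by_cases h1 : p.1 = k
    · have h2 : ¬ (k' = k) → ¬ (p.1 = k') := by intro hk h3; exact hk (h3 ▸ h1)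
      by_cases hk : k' = k
      · simp [List.filter_cons, h1, hk, ih]
      · have hkk : ¬ (k = k') := fun h => hk h.symm
        simp [List.filter_cons, List.find?_cons, h1, hk, hkk, ih]
    · by_cases h2 : p.1 = k'
      · by_cases hk : k' = k
        · exact absurd (h2.trans hk) h1
        · simp [List.filter_cons, List.find?_cons, h1, h2, hk]
      · simp [List.filter_cons, List.find?_cons, h1, h2, ih]

theorem get?_erase (d : PySem.Dict Char Int) (k k' : Char) :
    (d.erase k).get? k' = if k' = k then none else d.get? k' := by
  show ((d.items.filter (fun p => !(p.1 == k))).find? (fun p => p.1 == k')).map (·.2) = _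
  rw [find?_filter_key]
  split <;> rfl

theorem shrink_spec (la : List Char) (k : Nat) (c : Char) (hk : k < la.length) :
    ∀ (w : List Char) (fuel : Nat) (d : PySem.Dict Char Int),
      DInv d w → w.length ≤ k + 1 →
      w = (la.take (k + 1)).drop (k + 1 - w.length) →
      w.length ≤ fuel →
      ∃ d', shrinkA la (k : Int) c fuel d ((k : Int) + 1 - w.length) =
              (d', (k : Int) + 1 - (win c w).length) ∧ DInv d' (win c w) := by
  intro w
  induction w with
  | nil =>
    intro fuel d hd _ _ _
    have hgd : d.getD c 0 = ((0 : Nat) : Int) := DInv_getD hd c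
    refine ⟨d, ?_, by simpa [win] using hd⟩
    cases fuel with
    | zero => simp [shrinkA, win]
    | succ m =>
      have hniff : ¬ (d.getD c 0 > 1 ∨ (k : Int) - ((k : Int) + 1 - ((([] : List Char).length : Nat) : Int)) + 1 > 3) := by
        rw [hgd]
        have h0 : ((([] : List Char).length : Nat) : Int) = 0 := rfl
        rw [h0]; push_cast; rintro (h | h) <;> omega
      rw [shrinkA, if_neg hniff]
      simp [win]
  | cons x t ih =>
    intro fuel d hd hlen hw hfuel
    cases fuel with
    | zero => simp at hfuel
    | succ m =>
      have hgd : d.getD c 0 = (((x :: t).count c : Nat) : Int) := DInv_getD hd c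
      have hcondIff : (d.getD c 0 > 1 ∨ (k : Int) - ((k : Int) + 1 - (((x :: t).length : Nat) : Int)) + 1 > 3)
          ↔ ((x :: t).count c > 1 ∨ (x :: t).length > 3) := by
        rw [hgd]; simp only [List.length_cons]; push_cast; omega
      by_cases hc : (x :: t).count c > 1 ∨ (x :: t).length > 3
      · -- loop body runs: pop the head
        have hwin : win c (x :: t) = win c t := by rw [win, if_pos hc]
        have htk : t.length ≤ k := by simpa using hlen
        have hidx : la[(k - t.length)]? = some x := by
          have h1 : ((la.take (k + 1)).drop (k + 1 - (x :: t).length))[0]? = some x := by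
            rw [← hw]; rfl
          rw [List.getElem?_drop] at h1
          have h2 : k + 1 - (x :: t).length + 0 = k - t.length := by
            simp only [List.length_cons, Nat.add_zero]; omega
          rw [h2, List.getElem?_take_of_lt (by omega)] at h1
          exact h1
        have hget : PySem.List.pyGet? la ((k : Int) + 1 - (((x :: t).length : Nat) : Int)) = some x := by
          have hl : (k : Int) + 1 - (((x :: t).length : Nat) : Int) = ((k - t.length : Nat) : Int) := by
            simp only [List.length_cons]; push_cast; omega
          rw [hl, PySem.List.pyGet?_natCast, hidx]
        have hcx : (x :: t).count x = t.count x + 1 := by simp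
        have hcnt : ∀ y : Char, y ≠ x → (x :: t).count y = t.count y := by
          intro y hyx
          have hxy : ¬ (x = y) := fun h => hyx h.symm
          simp [List.count_cons, hyx, hxy]
        have hd1 : ∀ y, (d.modify x 0 (· - 1)).get? y =
            if y = x then some ((((x :: t).count x : Nat) : Int) - 1) else d.get? y := by
          intro y
          show ((d.insert x (d.getD x 0 - 1)).get? y) = _
          rw [PySem.Dict.get?_insert, DInv_getD hd x]
        have hd1getD : (d.modify x 0 (· - 1)).getD x 0 = (((x :: t).count x : Nat) : Int) - 1 := by
          rw [PySem.Dict.getD_eq_get?_getD, hd1 x, if_pos rfl]; rfl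
        have hd2 : DInv (if (d.modify x 0 (· - 1)).getD x 0 = 0 then (d.modify x 0 (· - 1)).erase x
            else (d.modify x 0 (· - 1))) t := by
          by_cases h1 : (x :: t).count x = 1
          · rw [if_pos (by rw [hd1getD, h1]; simp)]
            intro y
            rw [get?_erase]
            by_cases hyx : y = x
            · rw [hyx, if_pos rfl, if_pos (by omega)]
            · rw [if_neg hyx, hd1 y, if_neg hyx, hd y, hcnt y hyx]
          · rw [if_neg (by rw [hd1getD]; intro hh; apply h1; omega)]
            intro y
            rw [hd1 y]
            by_cases hyx : y = x
            · rw [hyx, if_pos rfl, if_neg (show ¬ t.count x = 0 by omega)]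
              have heq : (((x :: t).count x : Nat) : Int) - 1 = ((t.count x : Nat) : Int) := by
                rw [hcx]; push_cast; ring
              rw [heq]
            · rw [if_neg hyx, hd y, hcnt y hyx]
        have ht : t = (la.take (k + 1)).drop (k + 1 - t.length) := by
          have h3 : k + 1 - t.length = (k + 1 - (x :: t).length) + 1 := by simp; omega
          rw [h3, ← List.tail_drop, ← hw]; rfl
        have hlc : (x :: t).length = t.length + 1 := rfl
        obtain ⟨d', hres, hdi⟩ := ih m _ hd2 (by omega) ht (by omega)
        refine ⟨d', ?_, by rw [hwin]; exact hdi⟩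
        rw [shrinkA, if_pos (hcondIff.mpr hc), hget, hwin]
        have harg : (k : Int) + 1 - ((t.length : Nat) : Int) =
            ((k : Int) + 1 - (((x :: t).length : Nat) : Int)) + 1 := by
          simp only [List.length_cons]; push_cast; omega
        rw [harg] at hres
        exact hres
      · have hwin : win c (x :: t) = x :: t := by rw [win, if_neg hc]
        refine ⟨d, ?_, by rw [hwin]; exact hd⟩
        rw [shrinkA, if_neg (fun hh => hc (hcondIff.mp hh)), hwin]

theorem model_append (xs : List Char) (c : Char) :
    model (xs ++ [c]) = stepM c (model xs) := by
  simp [model, List.foldl_append]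

def AInv (la : List Char) (k : Nat) (st : PySem.Dict Char Int × Int × Int) : Prop :=
  st.2.1 = (model (la.take k)).2 ∧
  st.2.2 = (k : Int) - ((model (la.take k)).1.length : Int) ∧
  DInv st.1 (model (la.take k)).1 ∧
  (model (la.take k)).1 = (la.take k).drop (k - (model (la.take k)).1.length) ∧
  (model (la.take k)).1.length ≤ k

theorem A_fold (la : List Char) : ∀ (k : Nat), k ≤ la.length →
    AInv la k ((PySem.List.pyRange 0 (k : Int) 1).foldl (stepA la) (PySem.Dict.empty, 0, 0)) := by
  intro k
  induction k with
  | zero =>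
    intro _
    rw [PySem.List.pyRange_one_eq_nil (by norm_num)]
    refine ⟨rfl, rfl, ?_, rfl, le_refl _⟩
    intro x
    simp [model, PySem.Dict.get?_empty]
  | succ k ihk =>
    intro hk1
    have hk : k < la.length := by omega
    have ih := ihk (by omega)
    have hsplit : ((k + 1 : Nat) : Int) = (k : Int) + 1 := by push_cast; ring
    rw [hsplit, PySem.List.pyRange_one_succ_right (by positivity), List.foldl_append]
    set st := (PySem.List.pyRange 0 (k : Int) 1).foldl (stepA la) (PySem.Dict.empty, 0, 0) with hst
    obtain ⟨hans, hl, hdinv, hsfx, hwlen⟩ := ih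
    set w := (model (la.take k)).1 with hwdef
    set c := la[k] with hcdef
    have htake : la.take (k + 1) = la.take k ++ [c] := by
      rw [List.take_succ, List.getElem?_eq_getElem hk]
      rfl
    have hmodel : model (la.take (k + 1)) = stepM c (model (la.take k)) := by
      rw [htake, model_append]
    -- unfold one step of A
    have hget : PySem.List.pyGet? la ((k : Nat) : Int) = some c := by
      rw [PySem.List.pyGet?_natCast, List.getElem?_eq_getElem hk]
    -- the dict after the insert/increment, with a uniform description
    have hd1 : DInv (if st.1.contains c then st.1.modify c 0 (· + 1) else st.1.insert c 1)
        (w ++ [c]) := by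
      have hcontains : st.1.contains c = (st.1.get? c).isSome := by
        rw [PySem.Dict.contains_eq_isSome_get?]
      have hcount : ∀ y : Char, (w ++ [c]).count y = w.count y + if y = c then 1 else 0 := by
        intro y
        by_cases hyc : y = c
        · simp [List.count_append, List.count_singleton, beq_iff_eq, hyc]
        · have hcy : ¬ c = y := fun h => hyc h.symm
          simp [List.count_append, List.count_singleton, beq_iff_eq, hyc, hcy]
      by_cases h0 : w.count c = 0
      · have hnone : st.1.get? c = none := by rw [hdinv c, if_pos h0]
        rw [hcontains, hnone]
        simp only [Option.isSome_none, Bool.false_eq_true, if_false]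
        intro y
        rw [PySem.Dict.get?_insert]
        by_cases hyc : y = c
        · rw [if_pos hyc, hyc, if_neg (by rw [hcount c]; simp)]
          rw [hcount c, h0]
          norm_num
        · rw [if_neg hyc, hdinv y, hcount y, if_neg hyc]
          simp
      · have hsome : st.1.get? c = some ((w.count c : Nat) : Int) := by
          rw [hdinv c, if_neg h0]
        rw [hcontains, hsome]
        simp only [Option.isSome_some, if_true]
        intro y
        show (st.1.insert c (st.1.getD c 0 + 1)).get? y = _
        rw [PySem.Dict.get?_insert, DInv_getD hdinv c]
        by_cases hyc : y = c
        · rw [if_pos hyc, hyc, if_neg (by rw [hcount c]; omega)]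
          rw [hcount c]
          simp only [if_pos rfl]
          push_cast
          ring_nf
        · rw [if_neg hyc, hdinv y, hcount y, if_neg hyc]
          simp
    -- the window after the insert is a suffix of take (k+1)
    have hsfx1 : w ++ [c] = (la.take (k + 1)).drop (k + 1 - (w ++ [c]).length) := by
      have h1 : k + 1 - (w ++ [c]).length = k - w.length := by
        simp only [List.length_append, List.length_singleton]; omega
      rw [h1, htake, List.drop_append_of_le_length (by rw [List.length_take]; omega), ← hsfx]
    have hlen1 : (w ++ [c]).length ≤ k + 1 := by
      simp only [List.length_append, List.length_singleton]; omega
    obtain ⟨d', hres, hdi⟩ := shrink_spec la k c hk (w ++ [c]) (la.length + 1)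
      _ hd1 hlen1 hsfx1 (by simp only [List.length_append, List.length_singleton]; omega)
    -- the window after the shrink
    obtain ⟨j, hj, hWdrop⟩ := win_suffix c (w ++ [c])
    set W := win c (w ++ [c]) with hWdef
    have hWlen : W.length = (w ++ [c]).length - j := by rw [hWdrop, List.length_drop]
    have hWlen1 : W.length ≤ k + 1 := by
      simp only [List.length_append, List.length_singleton] at hWlen ⊢; omega
    have hWsfx : W = (la.take (k + 1)).drop (k + 1 - W.length) := by
      have h1 : k + 1 - W.length = (k + 1 - (w ++ [c]).length) + j := by
        simp only [List.length_append, List.length_singleton] at hWlen hj ⊢; omega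
      rw [h1, ← List.drop_drop, ← hsfx1, ← hWdrop]
    -- assemble
    have harg : (k : Int) - ((w.length : Nat) : Int) = (k : Int) + 1 - (((w ++ [c]).length : Nat) : Int) := by
      simp only [List.length_append, List.length_singleton]; push_cast; ring
    refine ?_
    show AInv la (k + 1) (stepA la st ((k : Nat) : Int))
    unfold stepA
    rw [hget]
    simp only
    rw [hl, harg, hres]
    have hcond : ((k : Int) - ((k : Int) + 1 - ((W.length : Nat) : Int)) + 1 = 3) ↔ W.length = 3 := by
      omega
    refine ⟨?_, ?_, ?_, ?_, ?_⟩
    · show (if (k : Int) - ((k : Int) + 1 - ((W.length : Nat) : Int)) + 1 = 3 then st.2.1 + 1 else st.2.1)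
        = (model (la.take (k + 1))).2
      rw [hmodel]
      show _ = (model (la.take k)).2 + (if W.length = 3 then 1 else 0)
      rw [← hans]
      by_cases h3 : W.length = 3
      · rw [if_pos (hcond.mpr h3), if_pos h3]
      · rw [if_neg (fun hh => h3 (hcond.mp hh)), if_neg h3]; ring
    · show ((k : Int) + 1 - ((W.length : Nat) : Int)) = ((k + 1 : Nat) : Int) - (((model (la.take (k+1))).1.length : Nat) : Int)
      rw [hmodel]
      show _ = ((k + 1 : Nat) : Int) - ((W.length : Nat) : Int)
      push_cast
      ring
    · show DInv d' (model (la.take (k + 1))).1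
      rw [hmodel]
      exact hdi
    · show (model (la.take (k + 1))).1 = (la.take (k + 1)).drop ((k + 1) - (model (la.take (k + 1))).1.length)
      rw [hmodel]
      exact hWsfx
    · show (model (la.take (k + 1))).1.length ≤ k + 1
      rw [hmodel]
      exact hWlen1

theorem A_eq_model (a : String) : goodSubStr a = (model a.toList).2 := by
  have h := (A_fold a.toList a.toList.length (le_refl _)).1
  rw [List.take_length] at h
  show ((PySem.List.pyRange 0 (PySem.List.len a.toList) 1).foldl (stepA a.toList)
    (PySem.Dict.empty, 0, 0)).2.1 = _
  rw [PySem.List.len_eq]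
  exact h


theorem set_card3 (v : List Char) (h : v.length = 3) :
    PySem.List.len (PySem.Set.ofList v) = 3 ↔ v.Nodup := by
  obtain ⟨a, b, c, hv⟩ : ∃ a b c, v = [a, b, c] := by
    match v, h with | [a, b, c], _ => exact ⟨a, b, c, rfl⟩
  subst hv
  rw [PySem.List.len_eq]
  by_cases hab : a = b
  · subst hab
    by_cases hac : a = c
    · subst hac
      simp [PySem.Set.ofList, PySem.Set.add, PySem.Set.contains]
    · simp [PySem.Set.ofList, PySem.Set.add, PySem.Set.contains, hac, Ne.symm hac]
  · by_cases hac : a = c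
    · subst hac
      simp [PySem.Set.ofList, PySem.Set.add, PySem.Set.contains, hab, Ne.symm hab]
    · by_cases hbc : b = c
      · subst hbc
        simp [PySem.Set.ofList, PySem.Set.add, PySem.Set.contains, hab, Ne.symm hab]
      · simp [PySem.Set.ofList, PySem.Set.add, PySem.Set.contains,
          hab, Ne.symm hab, hac, Ne.symm hac, hbc, Ne.symm hbc]

theorem drop_last3 (u rest : List Char) (h : rest.length = 3) :
    (u ++ rest).drop ((u ++ rest).length - 3) = rest := by
  rw [List.length_append, h, Nat.add_sub_cancel, List.drop_left]

theorem bcount_append (xs : List Char) (c : Char) :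
    bcount (xs ++ [c]) = bcount xs +
      (if 3 ≤ (xs ++ [c]).length ∧ ((xs ++ [c]).drop ((xs ++ [c]).length - 3)).Nodup
       then 1 else 0) := by
  by_cases h2 : 2 ≤ xs.length
  · have hlen : (PySem.List.len (xs ++ [c]) : Int) - 2 = ((xs.length : Int) - 2) + 1 := by
      rw [PySem.List.len_eq]
      push_cast [List.length_append, List.length_singleton]
      ring
    unfold bcount
    rw [hlen, PySem.List.pyRange_one_succ_right (by push_cast; omega), List.foldl_append]
    have hcongr : (PySem.List.pyRange 0 ((xs.length : Int) - 2) 1).foldl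
        (fun count i =>
          if PySem.List.len (PySem.Set.ofList (PySem.List.slice (xs ++ [c]) (some i) (some (i + 3)))) = 3
          then count + 1 else count) (0 : Int) =
        (PySem.List.pyRange 0 (PySem.List.len xs - 2) 1).foldl
        (fun count i =>
          if PySem.List.len (PySem.Set.ofList (PySem.List.slice xs (some i) (some (i + 3)))) = 3
          then count + 1 else count) (0 : Int) := by
      rw [PySem.List.len_eq]
      apply PySem.List.foldl_congr_mem'
      intro i hi acc
      have hmem := (PySem.List.mem_pyRange_one).1 hi
      have hslice : PySem.List.slice (xs ++ [c]) (some i) (some (i + 3)) =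
          PySem.List.slice xs (some i) (some (i + 3)) := by
        rw [PySem.List.slice_toNat (xs ++ [c]) (by omega) (by omega), PySem.List.slice_toNat xs (by omega) (by omega)]
        have h3 : (i + 3).toNat - i.toNat = 3 := by omega
        have hle : i.toNat ≤ xs.length := by omega
        rw [h3, List.drop_append_of_le_length hle,
          List.take_append_of_le_length (by rw [List.length_drop]; omega)]
      rw [hslice]
    rw [hcongr]
    simp only [List.foldl_cons, List.foldl_nil]
    -- the final window
    have hD : PySem.List.slice (xs ++ [c]) (some ((xs.length : Int) - 2)) (some (((xs.length : Int) - 2) + 3)) =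
        (xs ++ [c]).drop ((xs ++ [c]).length - 3) := by
      rw [PySem.List.slice_toNat (xs ++ [c]) (by omega) (by omega)]
      have h1 : ((xs.length : Int) - 2).toNat = (xs ++ [c]).length - 3 := by
        simp only [List.length_append, List.length_singleton]; omega
      rw [h1]
      apply List.take_of_length_le
      rw [List.length_drop]
      simp only [List.length_append, List.length_singleton]
      omega
    have hDlen : ((xs ++ [c]).drop ((xs ++ [c]).length - 3)).length = 3 := by
      rw [List.length_drop]
      simp only [List.length_append, List.length_singleton]
      omega
    rw [hD]
    have h3le : 3 ≤ (xs ++ [c]).length := by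
      simp only [List.length_append, List.length_singleton]; omega
    by_cases hnd : ((xs ++ [c]).drop ((xs ++ [c]).length - 3)).Nodup
    · rw [if_pos ((set_card3 _ hDlen).2 hnd), if_pos ⟨h3le, hnd⟩]
    · rw [if_neg (fun hh => hnd ((set_card3 _ hDlen).1 hh)), if_neg (fun hh => hnd hh.2)]
      ring
  · have hr1 : PySem.List.pyRange 0 (PySem.List.len xs - 2) 1 = [] := by
      apply PySem.List.pyRange_one_eq_nil
      rw [PySem.List.len_eq]; push_cast; omega
    have hr2 : PySem.List.pyRange 0 (PySem.List.len (xs ++ [c]) - 2) 1 = [] := by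
      apply PySem.List.pyRange_one_eq_nil
      rw [PySem.List.len_eq]
      simp only [List.length_append, List.length_singleton]; push_cast; omega
    have hcond : ¬ (3 ≤ (xs ++ [c]).length ∧ ((xs ++ [c]).drop ((xs ++ [c]).length - 3)).Nodup) := by
      intro hh
      have := hh.1
      simp only [List.length_append, List.length_singleton] at this
      omega
    unfold bcount
    rw [hr1, hr2, if_neg hcond]
    simp

-- the window invariant: w is a distinct suffix, capped at 3, and maximal unless full length 3
def Q (la w : List Char) : Prop :=
  ∃ u, la = u ++ w ∧ w.Nodup ∧ w.length ≤ 3 ∧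
    (u = [] ∨ w.length = 3 ∨ ∃ v x, u = v ++ [x] ∧ x ∈ w)

theorem win_stop (c : Char) (l : List Char) (h1 : l.count c ≤ 1) (h2 : l.length ≤ 3) :
    win c l = l := by
  cases l with
  | nil => rfl
  | cons x t => rw [win, if_neg (by omega)]

theorem win_pop (c x : Char) (t : List Char)
    (h : (x :: t).count c > 1 ∨ (x :: t).length > 3) : win c (x :: t) = win c t := by
  rw [win, if_pos h]

theorem step_main (xs w : List Char) (c : Char) (hQ : Q xs w) :
    Q (xs ++ [c]) (win c (w ++ [c])) ∧
    ((win c (w ++ [c])).length = 3 ↔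
      (3 ≤ (xs ++ [c]).length ∧ ((xs ++ [c]).drop ((xs ++ [c]).length - 3)).Nodup)) := by
  obtain ⟨u, hu, hnd, hle, hmax⟩ := hQ
  rcases w with _ | ⟨p, _ | ⟨q, _ | ⟨r, _ | ⟨s, tl⟩⟩⟩⟩
  · -- w = []
    have hu0 : u = [] := by
      rcases hmax with h | h | ⟨v, x, _, hx⟩
      · exact h
      · simp at h
      · simp at hx
    subst hu0
    simp only [List.append_nil] at hu
    subst hu
    have hW : win c ([] ++ [c]) = [c] := by
      apply win_stop <;> simp
    rw [hW]
    refine ⟨⟨[], rfl, by simp, by simp, Or.inl rfl⟩, by simp⟩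
  · -- w = [p]
    subst hu
    by_cases hcp : c = p
    · have hW : win c ([p] ++ [c]) = [c] := by
        rw [show ([p] ++ [c] : List Char) = p :: [c] from rfl,
          win_pop c p [c] (by left; simp [List.count_cons, beq_iff_eq, hcp]),
          win_stop c [c] (by simp) (by simp)]
      rw [hW]
      refine ⟨⟨u ++ [p], by simp, by simp, by simp, Or.inr (Or.inr ⟨u, p, rfl, by simp [hcp]⟩)⟩, ?_⟩
      constructor
      · intro h; simp at h
      · rintro ⟨h3, hD⟩
        exfalso
        rcases hmax with h | h | ⟨v, x, hv, hx⟩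
        · subst h; simp at h3
        · simp at h
        · have hxp : x = p := by simpa using hx
          rw [hxp] at hv
          subst hv
          have heq : ((v ++ [p]) ++ [p]) ++ [c] = v ++ [p, p, c] := by simp
          rw [heq, drop_last3 v [p, p, c] (by simp)] at hD
          simp at hD
    · have hpc : ¬ p = c := fun h => hcp h.symm
      have hW : win c ([p] ++ [c]) = [p, c] := by
        apply win_stop
        · simp [List.count_cons, beq_iff_eq, hcp, hpc]
        · simp
      rw [hW]
      refine ⟨⟨u, by simp, by simp [hpc], by simp, ?_⟩, ?_⟩
      · rcases hmax with h | h | ⟨v, x, hv, hx⟩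
        · exact Or.inl h
        · simp at h
        · have hxp : x = p := by simpa using hx
          exact Or.inr (Or.inr ⟨v, x, hv, by simp [hxp]⟩)
      constructor
      · intro h; simp at h
      · rintro ⟨h3, hD⟩
        exfalso
        rcases hmax with h | h | ⟨v, x, hv, hx⟩
        · subst h; simp at h3
        · simp at h
        · have hxp : x = p := by simpa using hx
          rw [hxp] at hv
          subst hv
          have heq : ((v ++ [p]) ++ [p]) ++ [c] = v ++ [p, p, c] := by simp
          rw [heq, drop_last3 v [p, p, c] (by simp)] at hD
          simp at hD
  · -- w = [p, q]
    subst hu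
    have hpq : ¬ p = q := by simp at hnd; exact hnd
    have hD : ((u ++ [p, q]) ++ [c]).drop (((u ++ [p, q]) ++ [c]).length - 3) = [p, q, c] := by
      have heq : (u ++ [p, q]) ++ [c] = u ++ [p, q, c] := by simp
      rw [heq, drop_last3 u [p, q, c] (by simp)]
    rw [hD]
    have h3le : 3 ≤ ((u ++ [p, q]) ++ [c]).length := by
      simp only [List.length_append, List.length_singleton, List.length_cons, List.length_nil]; omega
    have hcnt3 : ∀ z a b d : Char, ([a, b, d] : List Char).count z =
        (if a = z then 1 else 0) + (if b = z then 1 else 0) + (if d = z then 1 else 0) := by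
      intro z a b d
      simp only [List.count_cons, List.count_nil, beq_iff_eq]
      omega
    have hcnt2 : ∀ z x y : Char, ([x, y] : List Char).count z =
        (if x = z then 1 else 0) + (if y = z then 1 else 0) := by
      intro z x y
      simp only [List.count_cons, List.count_nil, beq_iff_eq]
      omega
    by_cases hcp : c = p
    · have hqc : ¬ q = c := fun h => hpq (h.trans hcp).symm
      have hW : win c ([p, q] ++ [c]) = [q, c] := by
        rw [show ([p, q] ++ [c] : List Char) = p :: [q, c] from rfl,
          win_pop c p [q, c] (by left; rw [hcnt3 c p q c, if_pos hcp.symm, if_neg hqc, if_pos rfl]; omega),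
          win_stop c [q, c] (by rw [hcnt2 c q c, if_neg hqc, if_pos rfl]) (by simp)]
      rw [hW]
      refine ⟨⟨u ++ [p], by simp, by simp [hqc], by simp, Or.inr (Or.inr ⟨u, p, rfl, by simp [hcp]⟩)⟩, ?_⟩
      constructor
      · intro h; simp at h
      · rintro ⟨_, hnd3⟩
        exfalso
        simp [hcp] at hnd3
    · by_cases hcq : c = q
      · have hpc : ¬ p = c := fun h => hcp h.symm
        have hW : win c ([p, q] ++ [c]) = [c] := by
          rw [show ([p, q] ++ [c] : List Char) = p :: [q, c] from rfl,
            win_pop c p [q, c] (by left; rw [hcnt3 c p q c, if_neg hpc, if_pos hcq.symm, if_pos rfl]; omega),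
            show ([q, c] : List Char) = q :: [c] from rfl,
            win_pop c q [c] (by left; rw [hcnt2 c q c, if_pos hcq.symm, if_pos rfl]; omega),
            win_stop c [c] (by simp) (by simp)]
        rw [hW]
        refine ⟨⟨u ++ [p, q], by simp, by simp, by simp,
          Or.inr (Or.inr ⟨u ++ [p], q, by simp, by simp [hcq]⟩)⟩, ?_⟩
        constructor
        · intro h; simp at h
        · rintro ⟨_, hnd3⟩
          exfalso
          simp [hcq] at hnd3
      · have hpc : ¬ p = c := fun h => hcp h.symm
        have hqc : ¬ q = c := fun h => hcq h.symm
        have hW : win c ([p, q] ++ [c]) = [p, q, c] := by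
          apply win_stop
          · rw [show (([p, q] ++ [c] : List Char)) = [p, q, c] from rfl, hcnt3 c p q c,
              if_neg hpc, if_neg hqc, if_pos rfl]
          · simp
        rw [hW]
        refine ⟨⟨u, by simp, by simp [hpq, hpc, hqc], by simp, Or.inr (Or.inl (by simp))⟩, ?_⟩
        constructor
        · intro _; exact ⟨h3le, by simp [hpq, hpc, hqc]⟩
        · intro _; simp
  · -- w = [p, q, r]
    subst hu
    have hpq : ¬ p = q := by simp at hnd; tauto
    have hpr : ¬ p = r := by simp at hnd; tauto
    have hqr : ¬ q = r := by simp at hnd; tauto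
    have hD : ((u ++ [p, q, r]) ++ [c]).drop (((u ++ [p, q, r]) ++ [c]).length - 3) = [q, r, c] := by
      have heq : (u ++ [p, q, r]) ++ [c] = (u ++ [p]) ++ [q, r, c] := by simp
      rw [heq, drop_last3 (u ++ [p]) [q, r, c] (by simp)]
    rw [hD]
    have h3le : 3 ≤ ((u ++ [p, q, r]) ++ [c]).length := by
      simp only [List.length_append, List.length_singleton, List.length_cons, List.length_nil]; omega
    have hcnt3 : ∀ z a b d : Char, ([a, b, d] : List Char).count z =
        (if a = z then 1 else 0) + (if b = z then 1 else 0) + (if d = z then 1 else 0) := by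
      intro z a b d
      simp only [List.count_cons, List.count_nil, beq_iff_eq]
      omega
    have hcnt2 : ∀ z x y : Char, ([x, y] : List Char).count z =
        (if x = z then 1 else 0) + (if y = z then 1 else 0) := by
      intro z x y
      simp only [List.count_cons, List.count_nil, beq_iff_eq]
      omega
    have hpop1 : win c ([p, q, r] ++ [c]) = win c [q, r, c] := by
      rw [show ([p, q, r] ++ [c] : List Char) = p :: [q, r, c] from rfl]
      exact win_pop c p [q, r, c] (by right; simp)
    by_cases hcq : c = q
    · have hrc : ¬ r = c := fun h => hqr (h.trans hcq).symm
      have hW : win c ([p, q, r] ++ [c]) = [r, c] := by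
        rw [hpop1, show ([q, r, c] : List Char) = q :: [r, c] from rfl,
          win_pop c q [r, c] (by left; rw [hcnt3 c q r c, if_pos hcq.symm, if_neg hrc, if_pos rfl]; omega),
          win_stop c [r, c] (by rw [hcnt2 c r c, if_neg hrc, if_pos rfl]) (by simp)]
      rw [hW]
      refine ⟨⟨u ++ [p, q], by simp, by simp [hrc], by simp,
        Or.inr (Or.inr ⟨u ++ [p], q, by simp, by simp [hcq]⟩)⟩, ?_⟩
      constructor
      · intro h; simp at h
      · rintro ⟨_, hnd3⟩
        exfalso
        simp [hcq] at hnd3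
    · by_cases hcr : c = r
      · have hqc : ¬ q = c := fun h => hcq h.symm
        have hW : win c ([p, q, r] ++ [c]) = [c] := by
          rw [hpop1, show ([q, r, c] : List Char) = q :: [r, c] from rfl,
            win_pop c q [r, c] (by left; rw [hcnt3 c q r c, if_neg hqc, if_pos hcr.symm, if_pos rfl]; omega),
            show ([r, c] : List Char) = r :: [c] from rfl,
            win_pop c r [c] (by left; rw [hcnt2 c r c, if_pos hcr.symm, if_pos rfl]; omega),
            win_stop c [c] (by simp) (by simp)]
        rw [hW]
        refine ⟨⟨u ++ [p, q, r], by simp, by simp, by simp,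
          Or.inr (Or.inr ⟨u ++ [p, q], r, by simp, by simp [hcr]⟩)⟩, ?_⟩
        constructor
        · intro h; simp at h
        · rintro ⟨_, hnd3⟩
          exfalso
          simp [hcr] at hnd3
      · have hqc : ¬ q = c := fun h => hcq h.symm
        have hrc : ¬ r = c := fun h => hcr h.symm
        have hW : win c ([p, q, r] ++ [c]) = [q, r, c] := by
          rw [hpop1]
          apply win_stop
          · rw [hcnt3 c q r c, if_neg hqc, if_neg hrc, if_pos rfl]
          · simp
        rw [hW]
        refine ⟨⟨u ++ [p], by simp, by simp [hqr, hqc, hrc], by simp, Or.inr (Or.inl (by simp))⟩, ?_⟩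
        constructor
        · intro _; exact ⟨h3le, by simp [hqr, hqc, hrc]⟩
        · intro _; simp
  · -- |w| ≥ 4: impossible with hle
    exfalso
    simp at hle
    omega

theorem M2 (la : List Char) : Q la (model la).1 ∧ (model la).2 = bcount la := by
  induction la using List.reverseRecOn with
  | nil =>
    constructor
    · exact ⟨[], rfl, by simp [model], by simp [model], Or.inl rfl⟩
    · show (0 : Int) = bcount []
      unfold bcount
      rw [PySem.List.pyRange_one_eq_nil (by norm_num)]
      rfl
  | append_singleton xs c ih =>
    obtain ⟨hQ, hb⟩ := ih
    have hs := step_main xs (model xs).1 c hQ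
    rw [model_append]
    refine ⟨hs.1, ?_⟩
    show (model xs).2 + (if (win c ((model xs).1 ++ [c])).length = 3 then 1 else 0)
      = bcount (xs ++ [c])
    rw [bcount_append, ← hb]
    by_cases h3 : (win c ((model xs).1 ++ [c])).length = 3
    · rw [if_pos h3, if_pos (hs.2.1 h3)]
    · rw [if_neg h3, if_neg (fun hh => h3 (hs.2.2 hh))]

theorem goodSubStr_spec : Claim_equal_goodSubStr := by
  intro a _
  show goodSubStr a = goodSubStr_alt a
  rw [A_eq_model]
  exact (M2 a.toList).2
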